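-- pv_equiv track=rewrite | github.com/boisgera/python-advanced-companion | tps/graphs/students/mazes_Paul_ETIENNE.py | reachable_set
-- ===== SOURCE A (Python) =====
-- def reachable_set(maze, origin):
--     vertices = maze[0]
--     edges = maze[1]
--     weights = maze[2]
--     cells = {origin}
--     running = True
--     while running:
--         test = cells.copy()
--         for cell in cells:
--             A = {edge for edge in edges if edge[0]==cell}
--             for edge in A:
--                 test.add(edge[1])
--         if cells == test:
--             running = False
--         cells = test
--     return cells
-- ===== SOURCE B (Python) =====
-- def reachable_set(maze, origin):
--     edges = maze[1]
--     adj = {}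
--     for (a, b) in edges:
--         adj[a] = adj.get(a, []) + [b]
--     visited = [origin]
--     i = 0
--     while i < len(visited):
--         for b in adj.get(visited[i], []):
--             if b not in visited:
--                 visited.append(b)
--         i += 1
--     return set(visited)
-- ===== Notes on version B (the rewrite author's own statement) =====
-- stated objective: alternative
-- what changed: Replaces A's repeated whole-set fixpoint rounds (each round rescans the full edge set for every cell found so far) by a single BFS: build an adjacency dict once, then expand a growing visited list with a queue index until exhausted.
import Mathlib
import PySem

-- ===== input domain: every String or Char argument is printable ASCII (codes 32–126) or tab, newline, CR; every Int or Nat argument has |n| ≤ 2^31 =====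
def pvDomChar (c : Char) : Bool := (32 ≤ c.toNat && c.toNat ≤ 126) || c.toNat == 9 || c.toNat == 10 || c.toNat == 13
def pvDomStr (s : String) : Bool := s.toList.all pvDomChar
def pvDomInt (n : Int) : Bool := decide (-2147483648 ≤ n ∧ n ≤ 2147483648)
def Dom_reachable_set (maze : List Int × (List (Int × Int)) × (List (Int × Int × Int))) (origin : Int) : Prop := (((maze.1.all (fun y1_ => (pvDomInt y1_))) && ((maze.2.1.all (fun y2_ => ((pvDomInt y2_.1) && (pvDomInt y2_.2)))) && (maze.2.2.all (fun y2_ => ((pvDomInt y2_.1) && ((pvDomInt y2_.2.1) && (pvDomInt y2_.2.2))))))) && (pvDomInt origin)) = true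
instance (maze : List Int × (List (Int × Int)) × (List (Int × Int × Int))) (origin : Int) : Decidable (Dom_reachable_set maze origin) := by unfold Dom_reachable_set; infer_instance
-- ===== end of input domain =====

-- B replaces A's repeated whole-set fixpoint rounds by a single BFS over an adjacency dict
-- built once (objective: alternative algorithm; same value on every input).


-- ===== PORT A =====
-- A's 'while running' loop; the fuel 'edges.length + 1' is only a totality bound: each
-- non-final round strictly grows 'cells' inside {origin} ∪ targets, so it is never exhausted
-- (proved in pvLoopA_fuel_irrelevant-style reasoning inside the equivalence proof).
def pvLoopA (edges : List (Int × Int)) (fuel : Nat) (cells : PySem.Set Int) : List Int :=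
  match fuel with
  | 0 => cells
  | fuel + 1 =>
    let test : PySem.Set Int :=
      cells.foldl (fun t cell =>
        (PySem.Set.ofList (edges.filter (fun edge => edge.1 == cell))).foldl
          (fun t edge => PySem.Set.add t edge.2) t) cells
    if PySem.Set.equal cells test then test else pvLoopA edges fuel test

def reachable_set (maze : List Int × (List (Int × Int)) × (List (Int × Int × Int))) (origin : Int) : List Int :=
  let _vertices := maze.1
  let edges := maze.2.1
  let _weights := maze.2.2
  pvLoopA edges (edges.length + 1) (PySem.Set.ofList [origin])

-- ===== PORT B =====
-- B's 'while i < len(visited)' loop; the fuel 'edges.length + 2' is only a totality bound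
-- (visited holds distinct nodes out of {origin} ∪ targets, so at most edges.length + 1 indices
-- are ever processed).
def pvLoopB (adj : PySem.Dict Int (List Int)) (fuel : Nat) (visited : List Int) (i : Nat) : List Int :=
  match fuel with
  | 0 => visited
  | fuel + 1 =>
    if h : i < visited.length then
      let visited' := (adj.getD visited[i] []).foldl
        (fun v b => if b ∈ v then v else v ++ [b]) visited
      pvLoopB adj fuel visited' (i + 1)
    else visited

def reachable_set_alt (maze : List Int × (List (Int × Int)) × (List (Int × Int × Int))) (origin : Int) : List Int :=
  let edges := maze.2.1
  let adj := edges.foldl (fun d e => d.modify e.1 [] (fun l => l ++ [e.2])) PySem.Dict.empty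
  PySem.Set.ofList (pvLoopB adj (edges.length + 2) [origin] 0)

-- ===== PRECONDITION & SPEC =====
def Spec_reachable_set (maze : List Int × (List (Int × Int)) × (List (Int × Int × Int))) (origin : Int) (out : List Int) : Prop := out = reachable_set_alt maze origin
instance (maze : List Int × (List (Int × Int)) × (List (Int × Int × Int))) (origin : Int) (out : List Int) : Decidable (Spec_reachable_set maze origin out) := by unfold Spec_reachable_set; infer_instance

-- ===== CLAIM (what is proved, stated in full; the proofs are below) =====
def Claim_equal_reachable_set : Prop := ∀ (maze : List Int × (List (Int × Int)) × (List (Int × Int × Int))) (origin : Int), Dom_reachable_set maze origin → Spec_reachable_set maze origin (reachable_set maze origin)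

-- ===== LEMMAS AND PROOFS =====

-- The common one-cell expansion: add every successor of c (in edge order) to s.
def pvF (edges : List (Int × Int)) (s : List Int) (c : Int) : List Int :=
  PySem.Set.update s ((edges.filter (fun e => e.1 == c)).map (·.2))

-- One round of A: expand every cell of s, starting from a copy of s.
def pvG (edges : List (Int × Int)) (s : List Int) : List Int :=
  s.foldl (pvF edges) s

lemma pv_ofList_map_ofList {α β : Type} [BEq α] [LawfulBEq α] [BEq β] [LawfulBEq β]
    (f : α → β) (l : List α) :
    PySem.Set.ofList ((PySem.Set.ofList l).map f) = PySem.Set.ofList (l.map f) := by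
  induction l using List.reverseRecOn with
  | nil => rfl
  | append_singleton xs x ih =>
    rw [PySem.Set.ofList_append_singleton]
    by_cases hx : x ∈ PySem.Set.ofList xs
    · rw [PySem.Set.add_of_mem hx, ih]
      simp only [List.map_append, List.map_singleton]
      rw [PySem.Set.ofList_append_singleton, PySem.Set.add_of_mem
        ((PySem.Set.mem_ofList _ _).mpr
          (List.mem_map.mpr ⟨x, (PySem.Set.mem_ofList _ _).mp hx, rfl⟩))]
    · rw [PySem.Set.add_of_not_mem hx]
      simp only [List.map_append, List.map_singleton]
      rw [PySem.Set.ofList_append_singleton, PySem.Set.ofList_append_singleton, ih]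

-- A's inner two loops are pvF.
lemma pv_stepA_eq (edges : List (Int × Int)) :
    (fun (t : PySem.Set Int) cell =>
        (PySem.Set.ofList (edges.filter (fun edge => edge.1 == cell))).foldl
          (fun t edge => PySem.Set.add t edge.2) t) = pvF edges := by
  funext t cell
  rw [← PySem.Set.update_map_eq_foldl_add, pvF, PySem.Set.update_eq_append_filter,
    PySem.Set.update_eq_append_filter, pv_ofList_map_ofList]

-- B's adjacency lookup plus inner loop is pvF.
lemma pv_stepB_eq (edges : List (Int × Int)) (v : List Int) (c : Int) :
    ((edges.foldl (fun d e => d.modify e.1 [] (fun l => l ++ [e.2])) PySem.Dict.empty).getD c []).foldl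
        (fun v b => if b ∈ v then v else v ++ [b]) v = pvF edges v c := by
  rw [PySem.Dict.getD_foldl_modify_append]
  have hadd : (fun (v : List Int) b => if b ∈ v then v else v ++ [b]) = PySem.Set.add := by
    funext v b
    rw [PySem.Set.add_eq_ite]
  rw [hadd]
  simp [PySem.Dict.getD_empty]
  rfl

lemma pv_prefix_f (edges : List (Int × Int)) (s : List Int) (c : Int) : s <+: pvF edges s c := by
  rw [pvF, PySem.Set.update_eq_append_filter]
  exact List.prefix_append _ _

lemma pv_nodup_f (edges : List (Int × Int)) (s : List Int) (c : Int) (h : s.Nodup) :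
    (pvF edges s c).Nodup := by
  rw [pvF]
  exact PySem.Set.nodup_update _ _ h

lemma pv_mem_f (edges : List (Int × Int)) (s : List Int) (c x : Int) :
    x ∈ pvF edges s c ↔ x ∈ s ∨ x ∈ (edges.filter (fun e => e.1 == c)).map (·.2) := by
  rw [pvF]
  exact PySem.Set.mem_update _ _ _

lemma pv_f_eq_self (edges : List (Int × Int)) (s : List Int) (c : Int)
    (h : ∀ x ∈ (edges.filter (fun e => e.1 == c)).map (·.2), x ∈ s) : pvF edges s c = s := by
  rw [pvF, PySem.Set.update_eq_append_filter]
  have hnil : (PySem.Set.ofList ((edges.filter (fun e => e.1 == c)).map (·.2))).filter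
      (fun y => !(PySem.Set.contains s y)) = [] := by
    rw [List.filter_eq_nil_iff]
    intro y hy
    have hys : y ∈ s := h y ((PySem.Set.mem_ofList _ _).mp hy)
    simpa using hys
  rw [hnil, List.append_nil]

lemma pv_prefix_foldl_f (edges : List (Int × Int)) (l : List Int) (v : List Int) :
    v <+: l.foldl (pvF edges) v := by
  induction l generalizing v with
  | nil => exact List.prefix_rfl
  | cons c l ih => exact (pv_prefix_f edges v c).trans (ih (pvF edges v c))

lemma pv_prefix_g (edges : List (Int × Int)) (s : List Int) : s <+: pvG edges s :=
  pv_prefix_foldl_f edges s s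

lemma pv_nodup_foldl_f (edges : List (Int × Int)) (l : List Int) (v : List Int) (h : v.Nodup) :
    (l.foldl (pvF edges) v).Nodup := by
  induction l generalizing v with
  | nil => exact h
  | cons c l ih => exact ih (pvF edges v c) (pv_nodup_f edges v c h)

lemma pv_mem_foldl_f (edges : List (Int × Int)) (l : List Int) (v : List Int) (x : Int)
    (h : x ∈ l.foldl (pvF edges) v) : x ∈ v ∨ ∃ e ∈ edges, e.2 = x := by
  induction l generalizing v with
  | nil => exact Or.inl h
  | cons c l ih =>
    rcases ih (pvF edges v c) h with hv | he
    · rcases (pv_mem_f edges v c x).mp hv with hv' | hm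
      · exact Or.inl hv'
      · rcases List.mem_map.mp hm with ⟨e, hef, he2⟩
        exact Or.inr ⟨e, (List.mem_filter.mp hef).1, he2⟩
    · exact Or.inr he

-- every successor of a cell of s is in g s
lemma pv_succ_mem_g (edges : List (Int × Int)) (s : List Int) (c x : Int) (hc : c ∈ s)
    (hx : x ∈ (edges.filter (fun e => e.1 == c)).map (·.2)) : x ∈ pvG edges s := by
  rw [pvG]
  have main : ∀ (l v : List Int), c ∈ l → x ∈ l.foldl (pvF edges) v := by
    intro l
    induction l with
    | nil => intro v hc'; cases hc'
    | cons a l ih =>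
      intro v hc'
      rcases List.mem_cons.mp hc' with heq | hm
      · subst heq
        exact (pv_prefix_foldl_f edges l (pvF edges v c)).subset
          ((pv_mem_f edges v c x).mpr (Or.inr hx))
      · exact ih (pvF edges v a) hm
  exact main s s hc

lemma pv_foldl_fixed (edges : List (Int × Int)) (l : List Int) (v : List Int)
    (h : ∀ c ∈ l, pvF edges v c = v) : l.foldl (pvF edges) v = v := by
  induction l with
  | nil => rfl
  | cons c l ih =>
    simp only [List.foldl_cons, h c (List.mem_cons_self)]
    exact ih (fun c' hc' => h c' (List.mem_cons_of_mem _ hc'))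

-- expanding the old cells of s on g s adds nothing
lemma pv_closure (edges : List (Int × Int)) (s : List Int) :
    s.foldl (pvF edges) (pvG edges s) = pvG edges s := by
  apply pv_foldl_fixed
  intro c hc
  apply pv_f_eq_self
  intro x hx
  exact pv_succ_mem_g edges s c x hc hx

-- next round = expanding only the new cells
lemma pv_g_g (edges : List (Int × Int)) (s : List Int) :
    pvG edges (pvG edges s) = ((pvG edges s).drop s.length).foldl (pvF edges) (pvG edges s) := by
  have hG : pvG edges (pvG edges s) = (pvG edges s).foldl (pvF edges) (pvG edges s) := rfl
  have hs : pvG edges s = s ++ (pvG edges s).drop s.length := by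
    conv_lhs => rw [← List.take_append_drop s.length (pvG edges s)]
    rw [← List.prefix_iff_eq_take.mp (pv_prefix_g edges s)]
  have h2 : (pvG edges s).foldl (pvF edges) (pvG edges s)
      = (s ++ (pvG edges s).drop s.length).foldl (pvF edges) (pvG edges s) :=
    congrArg (fun l => l.foldl (pvF edges) (pvG edges s)) hs
  rw [hG, h2, List.foldl_append, pv_closure]

lemma pv_equal_iff (edges : List (Int × Int)) (s : List Int) (h : s.Nodup) :
    PySem.Set.equal s (pvG edges s) = true ↔ pvG edges s = s := by
  constructor
  · intro he
    have hmem := (PySem.Set.equal_iff _ _).mp he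
    have hg : (pvG edges s).Nodup := pv_nodup_foldl_f edges s s h
    have hperm : (pvG edges s).Perm s :=
      (List.perm_ext_iff_of_nodup hg h).mpr (fun x => (hmem x).symm)
    exact ((pv_prefix_g edges s).eq_of_length hperm.length_eq.symm).symm
  · intro he
    rw [he]
    exact (PySem.Set.equal_iff _ _).mpr (fun x => Iff.rfl)

-- A's round, one unfolding
lemma pv_loopA_succ (edges : List (Int × Int)) (fuel : Nat) (s : PySem.Set Int) :
    pvLoopA edges (fuel + 1) s =
    if PySem.Set.equal s (pvG edges s) = true then pvG edges s
    else pvLoopA edges fuel (pvG edges s) := by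
  simp only [pvLoopA, pv_stepA_eq]
  rfl

lemma pv_loopB_done (adj : PySem.Dict Int (List Int)) (fuel : Nat) (v : List Int) (i : Nat)
    (h : v.length ≤ i) : pvLoopB adj fuel v i = v := by
  cases fuel with
  | zero => rfl
  | succ fuel => rw [pvLoopB, dif_neg (by omega)]

-- processing a block of queued cells cs that sit in v at positions i, i+1, …
lemma pv_batch (edges : List (Int × Int)) (adj : PySem.Dict Int (List Int))
    (hadj : adj = edges.foldl (fun d e => d.modify e.1 [] (fun l => l ++ [e.2])) PySem.Dict.empty)
    (cs : List Int) : ∀ (v : List Int) (i fuel : Nat),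
    (∀ j (hj : j < cs.length), v[i + j]? = some cs[j]) →
    pvLoopB adj (fuel + cs.length) v i = pvLoopB adj fuel (cs.foldl (pvF edges) v) (i + cs.length) := by
  have hstep : ∀ (v : List Int) (c : Int),
      (adj.getD c []).foldl (fun v b => if b ∈ v then v else v ++ [b]) v = pvF edges v c := by
    intro v c
    rw [hadj]
    exact pv_stepB_eq edges v c
  induction cs with
  | nil =>
    intro v i fuel h
    simp
  | cons c cs ih =>
    intro v i fuel h
    have h0 : v[i]? = some c := by simpa using h 0 (by simp)
    have hlt : i < v.length := (List.getElem?_eq_some_iff.mp h0).1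
    have hvi : v[i] = c := by
      rcases List.getElem?_eq_some_iff.mp h0 with ⟨h1, h2⟩
      exact h2
    have hshape : fuel + (c :: cs).length = (fuel + cs.length) + 1 := by
      simp only [List.length_cons]
      omega
    rw [hshape, pvLoopB, dif_pos hlt, hvi, hstep v c]
    show pvLoopB adj (fuel + cs.length) (pvF edges v c) (i + 1) = _
    have hnext : ∀ j (hj : j < cs.length), (pvF edges v c)[(i + 1) + j]? = some cs[j] := by
      intro j hj
      have hj' := h (j + 1) (by simpa using Nat.succ_lt_succ hj)
      have hlt' : i + (j + 1) < v.length := (List.getElem?_eq_some_iff.mp hj').1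
      obtain ⟨t, ht⟩ := pv_prefix_f edges v c
      have hpe : (pvF edges v c)[(i + 1) + j]? = v[(i + 1) + j]? := by
        rw [← ht, List.getElem?_append_left (by omega)]
      have harith : (i + 1) + j = i + (j + 1) := by omega
      rw [hpe, harith, hj']
      simp
    have hidx : (i + 1) + cs.length = i + (c :: cs).length := by
      simp only [List.length_cons]
      omega
    rw [ih (pvF edges v c) (i + 1) fuel hnext, hidx]
    rfl

-- the simulation: A's round loop from s equals B's queue loop sitting just after s's cells
lemma pv_sim (edges : List (Int × Int)) (adj : PySem.Dict Int (List Int))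
    (hadj : adj = edges.foldl (fun d e => d.modify e.1 [] (fun l => l ++ [e.2])) PySem.Dict.empty)
    (origin : Int) :
    ∀ (fuelA : Nat) (s : List Int) (fuelB : Nat), s.Nodup → s ⊆ origin :: edges.map (·.2) →
    edges.length + 2 ≤ fuelA + s.length → edges.length + 2 ≤ fuelB + s.length →
    pvLoopA edges fuelA s = pvLoopB adj fuelB (pvG edges s) s.length := by
  intro fuelA
  induction fuelA with
  | zero =>
    intro s fuelB hnd hsub hA hB
    exfalso
    have hlen : s.length ≤ (origin :: edges.map (·.2)).length := (hnd.subperm hsub).length_le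
    simp only [List.length_cons, List.length_map] at hlen
    omega
  | succ fuelA ih =>
    intro s fuelB hnd hsub hA hB
    have hGnd : (pvG edges s).Nodup := pv_nodup_foldl_f edges s s hnd
    have hGsub : pvG edges s ⊆ origin :: edges.map (·.2) := by
      intro x hx
      rcases pv_mem_foldl_f edges s s x hx with hxs | ⟨e, he, rfl⟩
      · exact hsub hxs
      · exact List.mem_cons_of_mem _ (List.mem_map.mpr ⟨e, he, rfl⟩)
    have hGlen : (pvG edges s).length ≤ edges.length + 1 := by
      have := (hGnd.subperm hGsub).length_le
      simpa using this
    have hpre := pv_prefix_g edges s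
    rw [pv_loopA_succ]
    by_cases heq : PySem.Set.equal s (pvG edges s) = true
    · rw [if_pos heq]
      have hgs : pvG edges s = s := (pv_equal_iff edges s hnd).mp heq
      rw [hgs, pv_loopB_done adj fuelB s s.length (le_refl _)]
    · rw [if_neg heq]
      have hne : pvG edges s ≠ s := fun hgs => heq ((pv_equal_iff edges s hnd).mpr hgs)
      have hslt : s.length < (pvG edges s).length := by
        rcases Nat.lt_or_ge s.length (pvG edges s).length with hlt | hge
        · exact hlt
        · exact absurd ((hpre.eq_of_length (Nat.le_antisymm hpre.length_le hge)).symm) hne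
      have hsplit : pvG edges s = s ++ (pvG edges s).drop s.length := by
        conv_lhs => rw [← List.take_append_drop s.length (pvG edges s)]
        rw [← List.prefix_iff_eq_take.mp hpre]
      have hdlen : ((pvG edges s).drop s.length).length = (pvG edges s).length - s.length := by
        simp
      have hfuelB : fuelB = (fuelB - ((pvG edges s).length - s.length)) +
          ((pvG edges s).drop s.length).length := by
        rw [hdlen]
        omega
      have hj : ∀ j (hjl : j < ((pvG edges s).drop s.length).length),
          (pvG edges s)[s.length + j]? = some ((pvG edges s).drop s.length)[j] := by
        intro j hjl
        conv_lhs => rw [hsplit]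
        rw [List.getElem?_append_right (by omega)]
        have hj0 : s.length + j - s.length = j := by omega
        rw [hj0]
        exact List.getElem?_eq_getElem hjl
      rw [hfuelB, pv_batch edges adj hadj ((pvG edges s).drop s.length) (pvG edges s)
        s.length _ hj]
      have hfold : ((pvG edges s).drop s.length).foldl (pvF edges) (pvG edges s) =
          pvG edges (pvG edges s) := (pv_g_g edges s).symm
      have hilen : s.length + ((pvG edges s).drop s.length).length = (pvG edges s).length := by
        rw [hdlen]
        omega
      rw [hfold, hilen]
      exact ih (pvG edges s) _ hGnd hGsub (by omega) (by omega)

lemma pv_nodup_loopA (edges : List (Int × Int)) (fuel : Nat) (s : PySem.Set Int) (h : s.Nodup) :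
    (pvLoopA edges fuel s).Nodup := by
  induction fuel generalizing s with
  | zero => exact h
  | succ fuel ih =>
    rw [pv_loopA_succ]
    split_ifs with heq
    · exact pv_nodup_foldl_f edges s s h
    · exact ih (pvG edges s) (pv_nodup_foldl_f edges s s h)

-- ===== VERDICT (by name: the statement is the Claim_ definition above) =====
theorem reachable_set_spec : Claim_equal_reachable_set := by
  intro maze origin _
  unfold Spec_reachable_set reachable_set reachable_set_alt
  simp only []
  set edges := maze.2.1 with hedges
  set adj := edges.foldl (fun d e => d.modify e.1 [] (fun l => l ++ [e.2])) PySem.Dict.empty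
    with hadj
  have h1 : PySem.Set.ofList [origin] = [origin] := rfl
  rw [h1]
  have hshape : edges.length + 2 = (edges.length + 1) + ([origin] : List Int).length := rfl
  have hbatch := pv_batch edges adj hadj [origin] [origin] 0 (edges.length + 1)
    (by
      intro j hj
      have hj0 : j = 0 := by simpa using hj
      subst hj0
      simp)
  rw [hshape, hbatch]
  have hsim := pv_sim edges adj hadj origin (edges.length + 1) [origin] (edges.length + 1)
    (by simp)
    (by
      intro x hx
      simp only [List.mem_singleton] at hx
      subst hx
      exact List.mem_cons_self)
    (by simp) (by simp)
  have hfold : ([origin] : List Int).foldl (pvF edges) [origin] = pvG edges [origin] := rfl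
  simp only [List.length_cons, List.length_nil, Nat.zero_add] at hsim ⊢
  rw [hfold, ← hsim]
  rw [PySem.Set.ofList_eq_self_of_nodup _ (pv_nodup_loopA edges (edges.length + 1) [origin]
    (by simp))]
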